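-- pv_equiv track=rewrite | github.com/YaroslavYaryk/python_stuff | Algorithm/Graph/Deikstra.py | args_min
-- ===== SOURCE A (Python) =====
-- def args_min(T,S):
--     amin = -1
--     m = max(T)
--     for i, t in enumerate(T):
--         if t<m and i not in S:
--             m = t
--             amin = i
--     return amin
-- ===== SOURCE B (Python) =====
-- def args_min(T, S):
--     m = max(T)
--     for i, t in sorted(enumerate(T), key=lambda p: (p[1], p[0])):
--         if t < m and i not in S:
--             return i
--     return -1
-- ===== Notes on version B (the rewrite author's own statement) =====
-- stated objective: alternative
-- what changed: Replaces A's single running-minimum accumulator loop by sorting the (value, index) pairs lexicographically and returning the first unvisited index below the max(T) threshold in sorted order.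
import Mathlib
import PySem

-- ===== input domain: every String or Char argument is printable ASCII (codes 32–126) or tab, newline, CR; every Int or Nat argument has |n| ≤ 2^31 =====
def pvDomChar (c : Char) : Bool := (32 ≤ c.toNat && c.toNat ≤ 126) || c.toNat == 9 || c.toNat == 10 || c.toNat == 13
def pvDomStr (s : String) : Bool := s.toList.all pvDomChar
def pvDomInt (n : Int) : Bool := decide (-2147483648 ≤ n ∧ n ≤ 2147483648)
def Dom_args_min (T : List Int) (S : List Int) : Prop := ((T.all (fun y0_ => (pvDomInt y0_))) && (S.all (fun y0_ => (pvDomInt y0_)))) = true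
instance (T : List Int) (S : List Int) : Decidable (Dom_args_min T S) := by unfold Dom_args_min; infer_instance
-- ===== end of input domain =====

-- B replaces A's running-minimum loop by sorting the enumerated pairs by the
-- (value, index) tuple key and returning the first unvisited index below the
-- max(T) threshold in sorted order; objective: alternative algorithm.

-- ===== PORT A =====
def args_min (T : List Int) (S : List Int) : Int :=
  match PySem.List.max? T (fun x => x) with
  | none => -1  -- unreachable under Pre_: max([]) raises ValueError
  | some m0 =>
      ((PySem.List.enumerate T 0).foldl
        (fun (st : Int × Int) p =>
          if decide (p.2 < st.2) && !decide (p.1 ∈ S) then (p.1, p.2) else st)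
        (-1, m0)).1

-- ===== PORT B =====
def args_min_alt (T : List Int) (S : List Int) : Int :=
  match PySem.List.max? T (fun x => x) with
  | none => -1  -- unreachable under Pre_: max([]) raises ValueError
  | some m =>
      -- sorted(enumerate(T), key=lambda p: (p[1], p[0]))
      match (PySem.List.sorted2 (PySem.List.enumerate T 0)
              (fun p => p.2) (fun p => p.1)).find?
              (fun p => decide (p.2 < m) && !decide (p.1 ∈ S)) with
      | some p => p.1   -- first (i, t) in sorted order with t < m and i not in S
      | none => -1

-- ===== PRECONDITION & SPEC =====
-- Pre_ excludes only the empty T, on which Python's max(T) raises ValueError.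
def Pre_args_min (T : List Int) (S : List Int) : Prop := T ≠ []
instance (T : List Int) (S : List Int) : Decidable (Pre_args_min T S) := by unfold Pre_args_min; infer_instance
def pvWitness_args_min : List Int × List Int := ([0, 1], [])
def Spec_args_min (T : List Int) (S : List Int) (out : Int) : Prop := out = args_min_alt T S
instance (T : List Int) (S : List Int) (out : Int) : Decidable (Spec_args_min T S out) := by unfold Spec_args_min; infer_instance

-- ===== CLAIM (what is proved, stated in full; the proofs are below) =====
def Claim_equal_args_min : Prop := ∀ (T : List Int) (S : List Int), Dom_args_min T S → Pre_args_min T S → Spec_args_min T S (args_min T S)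

-- ===== LEMMAS AND PROOFS =====

-- sorted2's strict lexicographic comparison on enumerate pairs (i, t), keys (t, i)
def lexB (a b : Int × Int) : Bool :=
  decide (a.2 < b.2) || (!decide (b.2 < a.2) && decide (a.1 < b.1))

theorem lexB_iff (a b : Int × Int) :
    lexB a b = true ↔ (a.2 < b.2 ∨ (a.2 = b.2 ∧ a.1 < b.1)) := by
  simp only [lexB, Bool.or_eq_true, Bool.and_eq_true, decide_eq_true_eq,
    Bool.not_eq_true', decide_eq_false_iff_not]
  omega

-- A's loop step (state = (amin, m))
def stepA (S : List Int) (st : Int × Int) (p : Int × Int) : Int × Int :=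
  if decide (p.2 < st.2) && !decide (p.1 ∈ S) then (p.1, p.2) else st

-- candidate filter of both programs, threshold m fixed
def predC (S : List Int) (m : Int) (p : Int × Int) : Bool :=
  decide (p.2 < m) && !decide (p.1 ∈ S)

-- fold computing the lexB-least candidate (an order-insensitive "best so far")
def stepB (S : List Int) (m : Int) (acc : Option (Int × Int)) (p : Int × Int) :
    Option (Int × Int) :=
  if predC S m p then
    match acc with
    | none => some p
    | some q => if lexB p q then some p else some q
  else acc

def toState (m0 : Int) (o : Option (Int × Int)) : Int × Int :=
  match o with
  | none => (-1, m0)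
  | some q => q

-- the lexB-smaller of q and p, ties to the first argument
def mn (q p : Int × Int) : Int × Int := if lexB p q then p else q

theorem stepB_none_pos (S : List Int) (m : Int) (p : Int × Int)
    (h : predC S m p = true) : stepB S m none p = some p := by
  simp [stepB, h]

theorem stepB_some_pos (S : List Int) (m : Int) (p : Int × Int)
    (h : predC S m p = true) (q : Int × Int) :
    stepB S m (some q) p = some (mn q p) := by
  unfold stepB mn
  rw [if_pos h]
  show (if lexB p q = true then some p else some q) = some (if lexB p q = true then p else q)
  split_ifs <;> rfl

theorem stepB_neg (S : List Int) (m : Int) (p : Int × Int)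
    (h : predC S m p = false) (acc : Option (Int × Int)) :
    stepB S m acc p = acc := by
  simp [stepB, h]

theorem mn_comm (a b : Int × Int) : mn a b = mn b a := by
  simp only [mn]
  split_ifs with h1 h2 h2 <;> try rfl
  · rw [lexB_iff] at h1 h2
    exact Prod.ext (by omega) (by omega)
  · rw [lexB_iff] at h1 h2
    exact Prod.ext (by omega) (by omega)

theorem mn_right_comm (q a b : Int × Int) : mn (mn q a) b = mn (mn q b) a := by
  simp only [mn]
  split_ifs <;>
    simp_all only [lexB_iff] <;>
    first | rfl | exact Prod.ext (by omega) (by omega)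

theorem stepB_rightComm (S : List Int) (m : Int) :
    ∀ (b : Option (Int × Int)) (a1 a2 : Int × Int),
      stepB S m (stepB S m b a1) a2 = stepB S m (stepB S m b a2) a1 := by
  intro b a1 a2
  cases hp1 : predC S m a1 with
  | false =>
    cases hp2 : predC S m a2 with
    | false => simp only [stepB_neg S m a1 hp1, stepB_neg S m a2 hp2]
    | true =>
      cases b with
      | none => simp only [stepB_neg S m a1 hp1, stepB_none_pos S m a2 hp2]
      | some q => simp only [stepB_neg S m a1 hp1, stepB_some_pos S m a2 hp2]
  | true =>
    cases hp2 : predC S m a2 with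
    | false =>
      cases b with
      | none => simp only [stepB_neg S m a2 hp2, stepB_none_pos S m a1 hp1]
      | some q => simp only [stepB_neg S m a2 hp2, stepB_some_pos S m a1 hp1]
    | true =>
      cases b with
      | none =>
        simp only [stepB_none_pos S m a1 hp1, stepB_none_pos S m a2 hp2,
          stepB_some_pos S m a2 hp2, stepB_some_pos S m a1 hp1]
        rw [mn_comm]
      | some q =>
        simp only [stepB_some_pos S m a1 hp1, stepB_some_pos S m a2 hp2]
        rw [mn_right_comm]

-- A's running-min fold equals the best-candidate fold, on any index-increasing list
theorem master (S : List Int) (m0 : Int) :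
    ∀ (l : List (Int × Int)), l.Pairwise (fun p q => p.1 < q.1) →
    ∀ (o : Option (Int × Int)), (∀ q, o = some q → q.2 < m0 ∧ ∀ p ∈ l, q.1 < p.1) →
    l.foldl (stepA S) (toState m0 o) = toState m0 (l.foldl (stepB S m0) o) := by
  intro l
  induction l with
  | nil => intro _ o _; rfl
  | cons p l ih =>
    intro hpw o ho
    rw [List.pairwise_cons] at hpw
    obtain ⟨hp, hpw'⟩ := hpw
    simp only [List.foldl_cons]
    cases o with
    | none =>
      by_cases hc : p.2 < m0 ∧ ¬ p.1 ∈ S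
      · have hA : stepA S (toState m0 none) p = toState m0 (some p) := by
          simp [stepA, toState, hc.1, hc.2]
        have hB : stepB S m0 none p = some p := by
          simp [stepB, predC, hc.1, hc.2]
        rw [hA, hB]
        apply ih hpw'
        intro q hq
        cases hq
        exact ⟨hc.1, fun r hr => hp r hr⟩
      · have hA : stepA S (toState m0 none) p = toState m0 none := by
          simp only [stepA, toState]
          rw [if_neg]; simp only [Bool.and_eq_true, decide_eq_true_eq, Bool.not_eq_true',
            decide_eq_false_iff_not]; tauto
        have hB : stepB S m0 none p = none := by
          simp only [stepB, predC]
          rw [if_neg]; simp only [Bool.and_eq_true, decide_eq_true_eq, Bool.not_eq_true',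
            decide_eq_false_iff_not]; tauto
        rw [hA, hB]
        exact ih hpw' none (by simp)
    | some q =>
      obtain ⟨hqm, hql⟩ := ho q rfl
      have hqp : q.1 < p.1 := hql p (by simp)
      by_cases hc : p.2 < q.2 ∧ ¬ p.1 ∈ S
      · -- p becomes the new best in both programs
        have hA : stepA S (toState m0 (some q)) p = toState m0 (some p) := by
          simp [stepA, toState, hc.1, hc.2]
        have hB : stepB S m0 (some q) p = some p := by
          have h1 : p.2 < m0 := lt_trans hc.1 hqm
          have h2 : lexB p q = true := (lexB_iff p q).mpr (Or.inl hc.1)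
          simp [stepB, predC, h1, hc.2, h2]
        rw [hA, hB]
        apply ih hpw'
        intro r hr
        cases hr
        exact ⟨lt_trans hc.1 hqm, fun s hs => hp s hs⟩
      · -- q stays the best in both programs
        have hA : stepA S (toState m0 (some q)) p = toState m0 (some q) := by
          simp only [stepA, toState]
          rw [if_neg]; simp only [Bool.and_eq_true, decide_eq_true_eq, Bool.not_eq_true',
            decide_eq_false_iff_not]; tauto
        have hB : stepB S m0 (some q) p = some q := by
          simp only [stepB, predC]
          by_cases hin : p.1 ∈ S
          · simp [hin]
          · have hnp : ¬ p.2 < q.2 := fun h => hc ⟨h, hin⟩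
            have hlex : lexB p q = false := by
              rw [← Bool.not_eq_true, lexB_iff]
              omega
            by_cases hm : p.2 < m0
            · simp [hm, hin, hlex]
            · simp [hm]
        rw [hA, hB]
        exact ih hpw' (some q) (fun r hr => by cases hr; exact ⟨hqm, fun s hs => hql s (by simp [hs])⟩)

-- insertBy with lexB preserves "weakly sorted" (no strict inversion)
theorem insertBy_pairwise (x : Int × Int) :
    ∀ (l : List (Int × Int)), l.Pairwise (fun a b => lexB b a = false) →
      (PySem.List.insertBy lexB x l).Pairwise (fun a b => lexB b a = false) := by
  intro l
  induction l with
  | nil =>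
    intro _
    simp [PySem.List.insertBy]
  | cons y ys ih =>
    intro hpw
    rw [List.pairwise_cons] at hpw
    obtain ⟨hy, hpw'⟩ := hpw
    show (if lexB x y = true then x :: y :: ys else y :: PySem.List.insertBy lexB x ys).Pairwise _
    by_cases hxy : lexB x y = true
    · rw [if_pos hxy]
      refine List.Pairwise.cons ?_ (List.Pairwise.cons hy hpw')
      intro z hz
      rcases List.mem_cons.mp hz with hz | hz
      · rw [hz]
        rw [← Bool.not_eq_true, lexB_iff]
        have h1 := (lexB_iff x y).mp hxy
        omega
      · have hzy := hy z hz
        rw [← Bool.not_eq_true, lexB_iff]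
        intro hzx
        have h1 := (lexB_iff x y).mp hxy
        have h2 : lexB z y = true := (lexB_iff z y).mpr (by omega)
        rw [hzy] at h2
        exact Bool.false_ne_true h2
    · rw [if_neg hxy]
      refine List.Pairwise.cons ?_ (ih hpw')
      intro z hz
      rcases (PySem.List.mem_insertBy lexB x z ys).mp hz with hz | hz
      · rw [hz]
        exact Bool.not_eq_true (lexB x y) |>.mp hxy
      · exact hy z hz

-- the sorted2 result is weakly sorted by lexB
theorem sorted2_pairwise_lexB (xs : List (Int × Int)) :
    (PySem.List.sorted2 xs (fun p => p.2) (fun p => p.1)).Pairwise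
      (fun a b => lexB b a = false) := by
  have key : ∀ (l : List (Int × Int)) (acc : List (Int × Int)),
      acc.Pairwise (fun a b => lexB b a = false) →
      (l.foldl (fun acc x => PySem.List.insertBy lexB x acc) acc).Pairwise
        (fun a b => lexB b a = false) := by
    intro l
    induction l with
    | nil => intro acc h; exact h
    | cons x l ih =>
      intro acc h
      exact ih _ (insertBy_pairwise x acc h)
  exact key xs [] (by simp)

-- once a lexB-minimal candidate is held, the fold keeps it
theorem foldl_stepB_keep (S : List Int) (m : Int) (q : Int × Int) :
    ∀ (l : List (Int × Int)), (∀ r ∈ l, lexB r q = false) →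
      l.foldl (stepB S m) (some q) = some q := by
  intro l
  induction l with
  | nil => intro _; rfl
  | cons r l ih =>
    intro h
    have hr : lexB r q = false := h r (by simp)
    have hstep : stepB S m (some q) r = some q := by
      simp only [stepB, hr]
      split_ifs <;> simp_all
    rw [List.foldl_cons, hstep]
    exact ih (fun s hs => h s (by simp [hs]))

-- on a lexB-sorted list the best-candidate fold is the first matching element
theorem foldl_stepB_sorted (S : List Int) (m : Int) :
    ∀ (l : List (Int × Int)), l.Pairwise (fun a b => lexB b a = false) →
      l.foldl (stepB S m) none = l.find? (predC S m) := by
  intro l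
  induction l with
  | nil => intro _; rfl
  | cons p l ih =>
    intro hpw
    rw [List.pairwise_cons] at hpw
    obtain ⟨hp, hpw'⟩ := hpw
    by_cases hc : predC S m p = true
    · have hstep : stepB S m none p = some p := by simp [stepB, hc]
      rw [List.foldl_cons, hstep, List.find?_cons_of_pos hc]
      exact foldl_stepB_keep S m p l hp
    · have hstep : stepB S m none p = none := by
        simp only [stepB]
        rw [if_neg hc]
      rw [List.foldl_cons, hstep,
        List.find?_cons_of_neg (by simpa using hc)]
      exact ih hpw'

-- ===== VERDICT (by name: the statement is the Claim_ definition above) =====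
theorem args_min_spec : Claim_equal_args_min := by
  intro T S _ hpre
  unfold Spec_args_min args_min args_min_alt
  cases hmax : PySem.List.max? T (fun x => x) with
  | none => rfl
  | some m =>
    simp only []
    have hE := PySem.List.pairwise_lt_enumerate T 0
    -- A's fold = best-candidate fold over enumerate
    have hA : ((PySem.List.enumerate T 0).foldl
        (fun (st : Int × Int) p =>
          if decide (p.2 < st.2) && !decide (p.1 ∈ S) then (p.1, p.2) else st) (-1, m))
        = toState m ((PySem.List.enumerate T 0).foldl (stepB S m) none) :=
      master S m (PySem.List.enumerate T 0) hE none (by simp)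
    -- the best-candidate fold is permutation-invariant: move it to the sorted list
    have hperm : (PySem.List.enumerate T 0).Perm
        (PySem.List.sorted2 (PySem.List.enumerate T 0) (fun p => p.2) (fun p => p.1)) :=
      (PySem.List.sorted2_perm (PySem.List.enumerate T 0)
        (fun p => p.2) (fun p => p.1) false).symm
    have hmove := @List.Perm.foldl_eq _ _ (stepB S m) _ _
      ⟨stepB_rightComm S m⟩ hperm (none : Option (Int × Int))
    -- on the sorted list the fold is the first matching element = B's scan
    have hfind := foldl_stepB_sorted S m
      (PySem.List.sorted2 (PySem.List.enumerate T 0) (fun p => p.2) (fun p => p.1))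
      (sorted2_pairwise_lexB (PySem.List.enumerate T 0))
    rw [hA, hmove, hfind]
    show (toState m ((PySem.List.sorted2 (PySem.List.enumerate T 0)
        (fun p => p.2) (fun p => p.1)).find? (predC S m))).1
      = match (PySem.List.sorted2 (PySem.List.enumerate T 0)
          (fun p => p.2) (fun p => p.1)).find? (predC S m) with
        | some p => p.1
        | none => -1
    cases (PySem.List.sorted2 (PySem.List.enumerate T 0)
        (fun p => p.2) (fun p => p.1)).find? (predC S m) with
    | none => rfl
    | some p => rfl
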